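-- pv_equiv track=rewrite | github.com/lisosia/speedread | speedread/extractor.py | _select_analysis_indices
-- ===== SOURCE A (Python) =====
-- from typing import Callable, Dict, Iterable, List, Optional, Tuple
--
-- def _expand_segment_starts(
--     boundaries: List[int],
--     total: int,
--     n_trans_max: int,
-- ) -> List[int]:
--     segment_starts = [0]
--     for boundary in boundaries:
--         if boundary > segment_starts[-1]:
--             segment_starts.append(boundary)
--
--     expanded_starts = list(segment_starts)
--     for idx, start in enumerate(segment_starts):
--         end = segment_starts[idx + 1] if idx + 1 < len(segment_starts) else total
--         current = start
--         while (end - current) > n_trans_max: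
--             current += n_trans_max
--             if current < end:
--                 expanded_starts.append(current)
--
--     return sorted(set(expanded_starts))
--
-- def _select_analysis_indices(
--     boundaries: List[int],
--     total: int,
--     n_trans_max: int,
-- ) -> List[int]:
--     if total <= 0:
--         return []
--     if not boundaries:
--         return list(range(total))
--
--     segment_starts = _expand_segment_starts(boundaries, total, n_trans_max)
--     indices: List[int] = []
--     for idx, start in enumerate(segment_starts):
--         end = segment_starts[idx + 1] if idx + 1 < len(segment_starts) else total
--         if end <= start:
--             continue
--         mid = start + (end - start) // 2
--         indices.append(mid)
--     return indices
-- ===== SOURCE B (Python) =====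
-- from typing import List
--
-- def _select_analysis_indices(
--     boundaries: List[int],
--     total: int,
--     n_trans_max: int,
-- ) -> List[int]:
--     if total <= 0:
--         return []
--     if not boundaries:
--         return list(range(total))
--
--     starts = [0]
--     for boundary in boundaries:
--         if boundary > starts[-1]:
--             starts.append(boundary)
--
--     indices: List[int] = []
--     for idx, start in enumerate(starts):
--         end = starts[idx + 1] if idx + 1 < len(starts) else total
--         current = start
--         while end - current > n_trans_max:
--             indices.append(current + n_trans_max // 2)
--             current += n_trans_max
--         if end > current:
--             indices.append(current + (end - current) // 2)
--     return indices
-- ===== Notes on version B (the rewrite author's own statement) =====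
-- stated objective: simpler
-- what changed: B fuses A's three-stage pipeline (expand all chunk starts, sorted(set(...)), pair consecutive entries for midpoints) into a single per-segment walk that emits each chunk midpoint directly, with no intermediate expanded list, no set and no sort.
import Mathlib
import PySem

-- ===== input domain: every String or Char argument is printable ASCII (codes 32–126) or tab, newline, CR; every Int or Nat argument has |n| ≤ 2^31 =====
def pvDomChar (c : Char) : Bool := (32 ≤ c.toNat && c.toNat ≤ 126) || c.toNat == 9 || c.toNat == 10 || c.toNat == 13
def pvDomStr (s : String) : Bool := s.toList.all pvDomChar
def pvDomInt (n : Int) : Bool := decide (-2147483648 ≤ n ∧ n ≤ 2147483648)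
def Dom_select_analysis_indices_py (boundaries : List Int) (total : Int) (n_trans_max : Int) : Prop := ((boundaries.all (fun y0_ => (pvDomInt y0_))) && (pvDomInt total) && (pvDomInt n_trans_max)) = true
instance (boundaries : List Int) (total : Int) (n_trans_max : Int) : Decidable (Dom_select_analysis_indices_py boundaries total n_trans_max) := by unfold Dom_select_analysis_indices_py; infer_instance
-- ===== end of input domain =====

-- B fuses A's expand / sorted(set(...)) / midpoint-pairing pipeline into one per-segment walk (simpler, one pass, no sort).

-- ===== PORT A =====
-- Both Pythons build the base segment-start list with the identical loop, so both ports share this helper.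
-- segment_starts[-1]: the accumulator is never empty (it starts as [0]), so getLastD 0 is exact here.
def pySegBase (boundaries : List Int) : List Int :=
  boundaries.foldl (fun acc b => if b > acc.getLastD 0 then acc ++ [b] else acc) [0]

-- the inner `while (end - current) > n_trans_max` loop of _expand_segment_starts.
-- The extra `1 ≤ n` in the guard is a totality guard only: for n ≤ 0 the Python loop never terminates
-- once entered (those inputs are outside Pre_).
def pyA_while (e n cur : Int) (exp : List Int) : List Int :=
  if h : e - cur > n ∧ 1 ≤ n then
    pyA_while e n (cur + n) (if cur + n < e then exp ++ [cur + n] else exp)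
  else exp
termination_by (e - cur).toNat
decreasing_by omega

-- the `for idx, start in enumerate(segment_starts)` loop of _expand_segment_starts
-- (end = next start, or total for the last one)
def pyA_expand (total n : Int) : List Int → List Int → List Int
  | [], exp => exp
  | s :: rest, exp => pyA_expand total n rest (pyA_while (rest.headD total) n s exp)

-- the midpoint loop of _select_analysis_indices over the sorted expanded starts
def pyA_mid (total : Int) : List Int → List Int
  | [] => []
  | s :: rest =>
    let e := rest.headD total
    if e ≤ s then pyA_mid total rest
    else (s + PySem.Int.floordiv (e - s) 2) :: pyA_mid total rest

def select_analysis_indices_py (boundaries : List Int) (total : Int) (n_trans_max : Int) : List Int :=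
  if total ≤ 0 then []
  else if boundaries = [] then PySem.List.pyRange 0 total 1
  else
    let ss := pySegBase boundaries
    let expanded := pyA_expand total n_trans_max ss ss
    pyA_mid total (PySem.List.sorted (PySem.Set.ofList expanded) (fun x => x) false)

-- ===== PORT B =====
-- per-segment walk of Source B: emit a midpoint per full chunk, then the remainder midpoint.
-- (same totality guard `1 ≤ n` as in A's while loop)
def pyB_seg (e n cur : Int) (acc : List Int) : List Int :=
  if h : e - cur > n ∧ 1 ≤ n then
    pyB_seg e n (cur + n) (acc ++ [cur + PySem.Int.floordiv n 2])
  else if e > cur then acc ++ [cur + PySem.Int.floordiv (e - cur) 2] else acc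
termination_by (e - cur).toNat
decreasing_by omega

def pyB_go (total n : Int) : List Int → List Int → List Int
  | [], acc => acc
  | s :: rest, acc => pyB_go total n rest (pyB_seg (rest.headD total) n s acc)

def select_analysis_indices_py_alt (boundaries : List Int) (total : Int) (n_trans_max : Int) : List Int :=
  if total ≤ 0 then []
  else if boundaries = [] then PySem.List.pyRange 0 total 1
  else pyB_go total n_trans_max (pySegBase boundaries) []

-- ===== PRECONDITION & SPEC =====
-- Pre_ excludes exactly the inputs on which A never returns: with total > 0 and a nonempty
-- boundary list, the `while (end - current) > n_trans_max` loop diverges whenever n_trans_max ≤ 0.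
def Pre_select_analysis_indices_py (boundaries : List Int) (total : Int) (n_trans_max : Int) : Prop :=
  total ≤ 0 ∨ boundaries = [] ∨ 1 ≤ n_trans_max
instance (boundaries : List Int) (total : Int) (n_trans_max : Int) : Decidable (Pre_select_analysis_indices_py boundaries total n_trans_max) := by unfold Pre_select_analysis_indices_py; infer_instance

def pvWitness_select_analysis_indices_py : List Int × Int × Int := ([3, 7], 10, 2)

def Spec_select_analysis_indices_py (boundaries : List Int) (total : Int) (n_trans_max : Int) (out : List Int) : Prop := out = select_analysis_indices_py_alt boundaries total n_trans_max
instance (boundaries : List Int) (total : Int) (n_trans_max : Int) (out : List Int) : Decidable (Spec_select_analysis_indices_py boundaries total n_trans_max out) := by unfold Spec_select_analysis_indices_py; infer_instance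

-- ===== CLAIM (what is proved, stated in full; the proofs are below) =====
def Claim_equal_select_analysis_indices_py : Prop := ∀ (boundaries : List Int) (total : Int) (n_trans_max : Int), Dom_select_analysis_indices_py boundaries total n_trans_max → Pre_select_analysis_indices_py boundaries total n_trans_max → Spec_select_analysis_indices_py boundaries total n_trans_max (select_analysis_indices_py boundaries total n_trans_max)

-- ===== LEMMAS AND PROOFS =====\n
-- interior chunk starts of one base segment, and the concatenation of all blocks
def intAll (total n : Int) : List Int → List Int
  | [] => []
  | s :: rest => pyA_while (rest.headD total) n s [] ++ intAll total n rest

def concatB (total n : Int) : List Int → List Int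
  | [] => []
  | s :: rest => (s :: pyA_while (rest.headD total) n s []) ++ concatB total n rest

theorem pyA_while_acc (e n cur : Int) (exp : List Int) :
    pyA_while e n cur exp = exp ++ pyA_while e n cur [] := by
  by_cases h : e - cur > n ∧ 1 ≤ n
  · rw [pyA_while, dif_pos h]
    conv_rhs => rw [pyA_while, dif_pos h]
    rw [pyA_while_acc e n (cur + n) (if cur + n < e then exp ++ [cur + n] else exp),
      pyA_while_acc e n (cur + n) (if cur + n < e then ([] : List Int) ++ [cur + n] else [])]
    by_cases hlt : cur + n < e <;> simp [hlt]
  · rw [pyA_while, dif_neg h]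
    conv_rhs => rw [pyA_while, dif_neg h]
    simp
termination_by (e - cur).toNat
decreasing_by all_goals omega

theorem pyB_seg_acc (e n cur : Int) (acc : List Int) :
    pyB_seg e n cur acc = acc ++ pyB_seg e n cur [] := by
  by_cases h : e - cur > n ∧ 1 ≤ n
  · rw [pyB_seg, dif_pos h]
    conv_rhs => rw [pyB_seg, dif_pos h]
    rw [pyB_seg_acc e n (cur + n) (acc ++ [cur + PySem.Int.floordiv n 2]),
      pyB_seg_acc e n (cur + n) (([] : List Int) ++ [cur + PySem.Int.floordiv n 2])]
    simp
  · rw [pyB_seg, dif_neg h]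
    conv_rhs => rw [pyB_seg, dif_neg h]
    by_cases hlt : e > cur <;> simp [hlt]
termination_by (e - cur).toNat
decreasing_by all_goals omega

theorem pyB_go_acc (total n : Int) (ss acc : List Int) :
    pyB_go total n ss acc = acc ++ pyB_go total n ss [] := by
  induction ss generalizing acc with
  | nil => simp [pyB_go]
  | cons s rest ih =>
    rw [pyB_go, pyB_go, ih, ih (pyB_seg (rest.headD total) n s []),
      pyB_seg_acc _ _ _ acc]
    simp

theorem pyA_expand_eq (total n : Int) (ss exp : List Int) :
    pyA_expand total n ss exp = exp ++ intAll total n ss := by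
  induction ss generalizing exp with
  | nil => simp [pyA_expand, intAll]
  | cons s rest ih =>
    rw [pyA_expand, ih, pyA_while_acc, intAll]
    simp

-- chunk interiors: strictly increasing above s, all below e
theorem pyA_while_chain (e n s : Int) (hn : 1 ≤ n) :
    List.IsChain (· < ·) (s :: pyA_while e n s []) ∧ ∀ x ∈ pyA_while e n s [], x < e := by
  by_cases h : e - s > n
  · rw [pyA_while, dif_pos ⟨h, hn⟩]
    have hlt : s + n < e := by omega
    simp only [hlt, if_pos, List.nil_append]
    rw [pyA_while_acc e n (s + n) [s + n], List.singleton_append]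
    have ih := pyA_while_chain e n (s + n) hn
    refine ⟨List.isChain_cons_cons.mpr ⟨by omega, ih.1⟩, ?_⟩
    intro x hx
    rcases List.mem_cons.mp hx with rfl | hx
    · omega
    · exact ih.2 x hx
  · rw [pyA_while, dif_neg (by tauto)]
    simp
termination_by (e - s).toNat
decreasing_by omega

-- per-segment fusion: A's midpoint pass over one block equals B's walk
theorem seg_fuse (e n s : Int) (hn : 1 ≤ n) :
    pyA_mid e (s :: pyA_while e n s []) = pyB_seg e n s [] := by
  by_cases h : e - s > n
  · have hlt : s + n < e := by omega
    rw [pyA_while, dif_pos ⟨h, hn⟩]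
    simp only [hlt, if_pos, List.nil_append]
    rw [pyA_while_acc e n (s + n) [s + n], List.singleton_append,
      pyA_mid, pyB_seg, dif_pos ⟨h, hn⟩, pyB_seg_acc e n (s + n)]
    have : ¬ (s + n : Int) ≤ s := by omega
    simp only [List.headD_cons, this, if_neg, add_sub_cancel_left]
    rw [seg_fuse e n (s + n) hn]
    simp
  · rw [pyA_while, dif_neg (by tauto), pyB_seg, dif_neg (by tauto), pyA_mid]
    by_cases he : e ≤ s
    · simp [pyA_mid, he, show ¬ e > s by omega]
    · simp [pyA_mid, he, show e > s by omega]
termination_by (e - s).toNat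
decreasing_by omega

-- A's midpoint pass splits at any explicit element
theorem pyA_mid_append (total y : Int) (xs ys : List Int) :
    pyA_mid total (xs ++ y :: ys) = pyA_mid y xs ++ pyA_mid total (y :: ys) := by
  induction xs with
  | nil => simp [pyA_mid]
  | cons x xs ih =>
    cases xs with
    | nil =>
      simp only [List.nil_append, List.cons_append]
      rw [pyA_mid]
      conv_rhs => rw [pyA_mid]
      simp only [List.headD_cons, List.headD_nil]
      by_cases hy : y ≤ x <;> simp [hy, pyA_mid]
    | cons x' xs' =>
      simp only [List.cons_append]
      rw [pyA_mid]
      conv_rhs => rw [pyA_mid]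
      simp only [List.cons_append, List.headD_cons]
      have ih' := ih
      simp only [List.cons_append] at ih'
      by_cases hx : x' ≤ x <;> simp [hx, ih']

theorem mid_concatB (total n : Int) (ss : List Int) (hn : 1 ≤ n) :
    pyA_mid total (concatB total n ss) = pyB_go total n ss [] := by
  induction ss with
  | nil => simp [concatB, pyA_mid, pyB_go]
  | cons s rest ih =>
    cases rest with
    | nil =>
      simp only [concatB, List.append_nil, pyB_go, List.headD_nil]
      exact seg_fuse total n s hn
    | cons y rest' =>
      have hcB : concatB total n (y :: rest') =
          y :: (pyA_while (rest'.headD total) n y [] ++ concatB total n rest') := by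
        simp [concatB]
      calc pyA_mid total (concatB total n (s :: y :: rest'))
          = pyA_mid total ((s :: pyA_while y n s []) ++
              y :: (pyA_while (rest'.headD total) n y [] ++ concatB total n rest')) := by
            simp [concatB]
        _ = pyA_mid y (s :: pyA_while y n s []) ++ pyA_mid total (concatB total n (y :: rest')) := by
            rw [pyA_mid_append, hcB]
        _ = pyB_seg y n s [] ++ pyB_go total n (y :: rest') [] := by
            rw [seg_fuse y n s hn, ih]
        _ = pyB_go total n (s :: y :: rest') [] := by
            conv_rhs => rw [pyB_go]
            simp only [List.headD_cons]
            conv_rhs => rw [pyB_go_acc total n (y :: rest')]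

theorem concatB_perm (total n : Int) (ss : List Int) :
    (concatB total n ss).Perm (ss ++ intAll total n ss) := by
  induction ss with
  | nil => simp [concatB, intAll]
  | cons s rest ih =>
    rw [concatB, intAll, List.cons_append]
    refine List.Perm.trans (List.Perm.cons s (List.Perm.append_left _ ih)) ?_
    refine List.Perm.cons s ?_
    refine List.Perm.trans List.perm_append_comm ?_
    rw [List.append_assoc]
    exact List.Perm.append_left rest List.perm_append_comm

theorem concatB_lb (total n : Int) (y : Int) (rest : List Int) (hn : 1 ≤ n)
    (hch : List.IsChain (· < ·) (y :: rest)) :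
    ∀ b ∈ concatB total n (y :: rest), y ≤ b := by
  induction rest generalizing y with
  | nil =>
    intro b hb
    simp only [concatB, List.append_nil] at hb
    rcases List.mem_cons.mp hb with rfl | hb
    · omega
    · have hp := (pyA_while_chain (List.headD [] total) n y hn).1.pairwise
      have := (List.pairwise_cons.mp hp).1 b hb
      omega
  | cons z rest' ih =>
    intro b hb
    simp only [concatB, List.cons_append, List.headD_cons, List.mem_cons, List.mem_append] at hb
    have hyz : y < z := (List.isChain_cons_cons.mp hch).1
    rcases hb with rfl | hb | hb
    · omega
    · have hp := (pyA_while_chain z n y hn).1.pairwise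
      have := (List.pairwise_cons.mp hp).1 b hb
      omega
    · have hz : z ≤ b := by
        refine ih z (List.IsChain.of_cons hch) b ?_
        simp only [concatB, List.cons_append, List.mem_cons, List.mem_append]
        tauto
      omega

theorem concatB_pairwise (total n : Int) (ss : List Int) (hn : 1 ≤ n)
    (hch : List.IsChain (· < ·) ss) :
    (concatB total n ss).Pairwise (· < ·) := by
  induction ss with
  | nil => simp [concatB]
  | cons s rest ih =>
    rw [concatB]
    refine List.pairwise_append.mpr ⟨(pyA_while_chain (rest.headD total) n s hn).1.pairwise,
      ih (List.IsChain.of_cons hch), ?_⟩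
    intro a ha b hb
    cases rest with
    | nil => simp [concatB] at hb
    | cons z rest' =>
      have hz : z ≤ b := concatB_lb total n z rest' hn (List.IsChain.of_cons hch) b hb
      have hsz : s < z := (List.isChain_cons_cons.mp hch).1
      rcases List.mem_cons.mp ha with rfl | ha
      · omega
      · have := (pyA_while_chain (List.headD (z :: rest') total) n s hn).2 a ha
        simp only [List.headD_cons] at this
        omega

theorem getLast?_eq_getLastD (acc : List Int) (h : acc ≠ []) :
    acc.getLast? = some (acc.getLastD 0) := by
  cases acc with
  | nil => simp at h
  | cons a l =>
    rw [List.getLastD_eq_getLast?]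
    cases hl : (a :: l).getLast? with
    | none => simp at hl
    | some x => simp

theorem segBase_aux (bs acc : List Int) (hne : acc ≠ [])
    (hch : List.IsChain (· < ·) acc) :
    bs.foldl (fun acc b => if b > acc.getLastD 0 then acc ++ [b] else acc) acc ≠ [] ∧
    List.IsChain (· < ·) (bs.foldl (fun acc b => if b > acc.getLastD 0 then acc ++ [b] else acc) acc) := by
  induction bs generalizing acc with
  | nil => exact ⟨hne, hch⟩
  | cons b bs ih =>
    rw [List.foldl_cons]
    by_cases hb : b > acc.getLastD 0
    · simp only [hb, if_pos]
      refine ih (acc ++ [b]) (by simp) ?_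
      refine List.isChain_append.mpr ⟨hch, by simp, ?_⟩
      intro x hx y hy
      simp only [getLast?_eq_getLastD acc hne, Option.mem_def, Option.some.injEq,
        List.head?_cons] at hx hy
      omega
    · simp only [hb, if_neg, not_false_iff]
      exact ih acc hne hch
  
theorem pySegBase_chain (boundaries : List Int) :
    List.IsChain (· < ·) (pySegBase boundaries) ∧ pySegBase boundaries ≠ [] := by
  have := segBase_aux boundaries [0] (by simp) (by simp)
  exact ⟨this.2, this.1⟩

-- ===== VERDICT (by name: the statement is the Claim_ definition above) =====
theorem select_analysis_indices_py_spec : Claim_equal_select_analysis_indices_py := by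
  intro boundaries total n _hdom hpre
  unfold Spec_select_analysis_indices_py select_analysis_indices_py select_analysis_indices_py_alt
  by_cases h1 : total ≤ 0
  · simp [h1]
  · simp only [h1, if_neg, not_false_iff]
    by_cases h2 : boundaries = []
    · simp [h2]
    · simp only [h2, if_neg, not_false_iff]
      have hn : 1 ≤ n := by
        rcases hpre with h | h | h
        · omega
        · exact absurd h h2
        · exact h
      have hchain := pySegBase_chain boundaries
      have hexp := pyA_expand_eq total n (pySegBase boundaries) (pySegBase boundaries)
      rw [hexp]
      have hpw : (concatB total n (pySegBase boundaries)).Pairwise (· < ·) :=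
        concatB_pairwise total n (pySegBase boundaries) hn hchain.1
      have hperm : (concatB total n (pySegBase boundaries)).Perm
          (pySegBase boundaries ++ intAll total n (pySegBase boundaries)) :=
        concatB_perm total n (pySegBase boundaries)
      have hnodup : (pySegBase boundaries ++ intAll total n (pySegBase boundaries)).Nodup :=
        hperm.nodup (hpw.imp (fun hlt => ne_of_lt hlt))
    
      rw [PySem.Set.ofList_eq_self_of_nodup _ hnodup,
        PySem.List.sorted_eq_of_perm_of_pairwise_lt _ _ _ hperm hpw,
        mid_concatB total n (pySegBase boundaries) hn]
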